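-- pv_equiv track=rewrite | github.com/danielcopper/romm-library | py_modules/domain/rom_files.py | detect_launch_file
-- ===== SOURCE A (Python) =====
-- def detect_launch_file(files: list[tuple[str, int]]) -> str | None:
--     """Pick the best launch file from a list of (path, size) tuples.
--
--     Priority order:
--     1. M3U playlist
--     2. CUE sheet
--     3. WiiU: .rpx (loadiine format in code/ subdirectory)
--     4. WiiU disc images: .wud, .wux, .wua
--     5. PS3: EBOOT.BIN
--     6. 3DS: .3ds > .cia > .cxi
--     7. Largest file by size
--
--     Parameters
--     ----------
--     files:
--         List of (absolute_path, size_in_bytes) tuples to consider.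
--         If empty, returns None.
--
--     Returns
--     -------
--     str | None
--         Absolute path to the best launch file, or None if ``files`` is empty.
--     """
--     if not files:
--         return None
--
--     paths = [path for path, _size in files]
--
--     # Prefer M3U > CUE
--     for ext in (".m3u", ".cue"):
--         matches = [p for p in paths if p.lower().endswith(ext)]
--         if matches:
--             return matches[0]
--
--     # WiiU: loadiine format has .rpx in code/ subdirectory
--     rpx_files = [p for p in paths if p.lower().endswith(".rpx")]
--     if rpx_files:
--         return rpx_files[0]
--
--     # WiiU disc images
--     for ext in (".wud", ".wux", ".wua"):
--         matches = [p for p in paths if p.lower().endswith(ext)]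
--         if matches:
--             return matches[0]
--
--     # PS3: EBOOT.BIN in PS3_GAME/USRDIR/
--     eboot_files = [p for p in paths if p.endswith("EBOOT.BIN")]
--     if eboot_files:
--         return eboot_files[0]
--
--     # 3DS: prefer .3ds > .cia > .cxi
--     for ext in (".3ds", ".cia", ".cxi"):
--         matches = [p for p in paths if p.lower().endswith(ext)]
--         if matches:
--             return matches[0]
--
--     # Largest file by pre-computed size
--     return max(files, key=lambda t: t[1])[0]
-- ===== SOURCE B (Python) =====
-- def _rank(path):
--     """Priority tier of a path: 0 (best) .. 9 for known launch-file kinds, 10 = fallback."""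
--     low = path.lower()
--     if low.endswith(".m3u"):
--         return 0
--     if low.endswith(".cue"):
--         return 1
--     if low.endswith(".rpx"):
--         return 2
--     if low.endswith(".wud"):
--         return 3
--     if low.endswith(".wux"):
--         return 4
--     if low.endswith(".wua"):
--         return 5
--     if path.endswith("EBOOT.BIN"):  # case-sensitive, as in the priority spec
--         return 6
--     if low.endswith(".3ds"):
--         return 7
--     if low.endswith(".cia"):
--         return 8
--     if low.endswith(".cxi"):
--         return 9
--     return 10
--
--
-- def detect_launch_file(files: list[tuple[str, int]]) -> str | None:
--     """Single classify-then-reduce pass: min over (tier, -size within the fallback tier)."""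
--     if not files:
--         return None
--
--     def key(t):
--         r = _rank(t[0])
--         return (r, -t[1] if r == 10 else 0)
--
--     return min(files, key=key)[0]
-- ===== Notes on version B (the rewrite author's own statement) =====
-- stated objective: alternative
-- what changed: A's cascade of up to ten separate filter-the-whole-list scans plus a final max pass is replaced by a rank helper classifying each path once and a single min pass over the composite key (rank, -size within the fallback tier).
import Mathlib
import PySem

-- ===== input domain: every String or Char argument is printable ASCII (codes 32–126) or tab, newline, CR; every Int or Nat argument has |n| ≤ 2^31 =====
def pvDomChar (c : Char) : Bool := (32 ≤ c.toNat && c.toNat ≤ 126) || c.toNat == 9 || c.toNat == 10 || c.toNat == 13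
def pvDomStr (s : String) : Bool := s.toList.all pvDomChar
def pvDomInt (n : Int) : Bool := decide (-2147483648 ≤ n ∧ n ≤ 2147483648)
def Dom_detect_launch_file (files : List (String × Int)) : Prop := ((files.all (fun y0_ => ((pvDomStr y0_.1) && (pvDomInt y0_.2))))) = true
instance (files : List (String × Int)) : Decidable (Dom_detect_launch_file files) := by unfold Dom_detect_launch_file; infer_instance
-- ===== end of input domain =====

-- B replaces A's cascade of ~10 filtered scans over the path list by one classify-then-reduce
-- pass: a rank helper plus a single min over the composite key (rank, -size within the fallback tier).

-- ===== PORT A =====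
-- A's 'for ext in (...)' loops: 'matches = [p ... endswith(ext)]; if matches: return matches[0]'
def firstByExts (paths : List String) : List String → Option String
  | [] => none
  | ext :: rest =>
    let m := (paths.filter (fun p => PySem.Str.endswith (PySem.Str.lower p) ext)).head?
    if m.isSome then m else firstByExts paths rest

def detect_launch_file (files : List (String × Int)) : Option String :=
  if files = [] then none
  else
    let paths := files.map (fun x => x.1)
    let m1 := firstByExts paths [".m3u", ".cue"]
    if m1.isSome then m1 else
    let rpx := (paths.filter (fun p => PySem.Str.endswith (PySem.Str.lower p) ".rpx")).head?
    if rpx.isSome then rpx else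
    let m2 := firstByExts paths [".wud", ".wux", ".wua"]
    if m2.isSome then m2 else
    let eboot := (paths.filter (fun p => PySem.Str.endswith p "EBOOT.BIN")).head?
    if eboot.isSome then eboot else
    let m3 := firstByExts paths [".3ds", ".cia", ".cxi"]
    if m3.isSome then m3 else
    -- max(files, key=lambda t: t[1])[0]; files is nonempty here, so Python's max returns
    (PySem.List.max? files (fun t => t.2)).map (fun e => e.1)

-- ===== PORT B =====
def launch_rank (path : String) : Nat :=
  let low := PySem.Str.lower path
  if PySem.Str.endswith low ".m3u" then 0
  else if PySem.Str.endswith low ".cue" then 1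
  else if PySem.Str.endswith low ".rpx" then 2
  else if PySem.Str.endswith low ".wud" then 3
  else if PySem.Str.endswith low ".wux" then 4
  else if PySem.Str.endswith low ".wua" then 5
  else if PySem.Str.endswith path "EBOOT.BIN" then 6
  else if PySem.Str.endswith low ".3ds" then 7
  else if PySem.Str.endswith low ".cia" then 8
  else if PySem.Str.endswith low ".cxi" then 9
  else 10

-- min(files, key=...)[0] with the composite key (rank, -size within the fallback tier)
def detect_launch_file_alt (files : List (String × Int)) : Option String :=
  if files = [] then none
  else
    (PySem.List.min2? files (fun t => launch_rank t.1)
      (fun t => if launch_rank t.1 = 10 then (-t.2 : Int) else 0)).map (fun e => e.1)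

-- ===== PRECONDITION & SPEC =====
def Spec_detect_launch_file (files : List (String × Int)) (out : Option String) : Prop := out = detect_launch_file_alt files
instance (files : List (String × Int)) (out : Option String) : Decidable (Spec_detect_launch_file files out) := by unfold Spec_detect_launch_file; infer_instance

-- ===== CLAIM (what is proved, stated in full; the proofs are below) =====
def Claim_equal_detect_launch_file : Prop := ∀ (files : List (String × Int)), Dom_detect_launch_file files → Spec_detect_launch_file files (detect_launch_file files)

-- ===== LEMMAS AND PROOFS =====

-- the ten tier checks of A, in priority order
def toCheck (ext : String) : String → Bool := fun p => PySem.Str.endswith (PySem.Str.lower p) ext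

def checksA : List (String → Bool) :=
  [toCheck ".m3u", toCheck ".cue", toCheck ".rpx", toCheck ".wud", toCheck ".wux", toCheck ".wua",
   fun p => PySem.Str.endswith p "EBOOT.BIN", toCheck ".3ds", toCheck ".cia", toCheck ".cxi"]

def fbA (files : List (String × Int)) : Option String :=
  (PySem.List.max? files (fun t => t.2)).map (fun e => e.1)

-- A's shape as a uniform cascade of filtered scans with a fallback
def cascade : List (String → Bool) → List String → Option String → Option String
  | [], _, fb => fb
  | c :: cs, paths, fb =>
    let m := (paths.filter c).head?
    if m.isSome then m else cascade cs paths fb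

-- rank as "index of the first passing check, counting from k; 10 if none"
def rankFrom (p : String) : List (String → Bool) → Nat → Nat
  | [], _ => 10
  | c :: cs, k => if c p then k else rankFrom p cs (k + 1)

-- B's keys
def K1 (e : String × Int) : Nat := launch_rank e.1
def K2 (e : String × Int) : Int := if launch_rank e.1 = 10 then -e.2 else 0

lemma rank_eq (p : String) : launch_rank p = rankFrom p checksA 0 := rfl

lemma rankFrom_ge (p : String) : ∀ (cs : List (String → Bool)) (k : Nat), k + cs.length = 10 → k ≤ rankFrom p cs k := by
  intro cs
  induction cs with
  | nil => intro k h; simp [rankFrom]; omega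
  | cons c cs ih =>
    intro k h
    simp only [rankFrom]
    split
    · exact le_refl k
    · have := ih (k + 1) (by simp at h ⊢; omega)
      omega

-- 'if m.isSome then m else fb' is Option.or
lemma isSome_if_or {α : Type} (o fb : Option α) : (if o.isSome then o else fb) = o.or fb := by
  cases o <;> rfl

lemma toCheck_def (ext : String) : toCheck ext = fun p => PySem.Str.endswith (PySem.Str.lower p) ext := rfl

lemma A_eq_cascade (files : List (String × Int)) (h : ¬ files = []) :
    detect_launch_file files = cascade checksA (files.map (fun x => x.1)) (fbA files) := by
  simp only [detect_launch_file, if_neg h, isSome_if_or, firstByExts,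
    checksA, cascade, toCheck_def, fbA, Option.or_assoc, Option.or_none]

-- min2?'s fold step, specialised to keys (Nat, Int)
def m2step {α : Type} (k1 : α → Nat) (k2 : α → Int) : Option α → α → Option α :=
  fun acc x =>
    match acc with
    | none => some x
    | some m =>
      if (decide (k1 x < k1 m) || (!decide (k1 m < k1 x) && decide (k2 x < k2 m))) = true
      then some x else some m

lemma min2?_eq_fold {α : Type} (xs : List α) (k1 : α → Nat) (k2 : α → Int) :
    PySem.List.min2? xs k1 k2 = xs.foldl (m2step k1 k2) none := rfl

-- max?'s fold step with the size key
def maxstep : Option (String × Int) → (String × Int) → Option (String × Int) :=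
  fun acc x =>
    match acc with
    | none => some x
    | some m => if m.2 < x.2 then some x else some m

lemma max?_eq_fold (xs : List (String × Int)) :
    PySem.List.max? xs (fun t => t.2) = xs.foldl maxstep none := by
  unfold PySem.List.max? maxstep
  congr 1
  funext acc x
  cases acc <;> rfl

lemma m2_keep {α : Type} (k1 : α → Nat) (k2 : α → Int) (m : α) : ∀ (l : List α),
    (∀ y ∈ l, ¬ (k1 y < k1 m) ∧ (k1 y = k1 m → ¬ (k2 y < k2 m))) →
    l.foldl (m2step k1 k2) (some m) = some m := by
  intro l
  induction l with
  | nil => intro _; rfl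
  | cons x xs ih =>
    intro h
    have hx := h x (by simp)
    have hstep : m2step k1 k2 (some m) x = some m := by
      simp only [m2step]
      have h1 : decide (k1 x < k1 m) = false := by simp [hx.1]
      by_cases he : k1 x = k1 m
      · have h2 : decide (k2 x < k2 m) = false := by simp [hx.2 he]
        simp [h1, h2]
      · have h3 : k1 m < k1 x := lt_of_le_of_ne (not_lt.1 hx.1) (Ne.symm he)
        simp [h1, h3]
    rw [List.foldl_cons, hstep]
    exact ih (fun y hy => h y (by simp [hy]))

lemma m2_pre {α : Type} (k1 : α → Nat) (k2 : α → Int) (e : α) : ∀ (l : List α) (acc : Option α),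
    (acc = none ∨ ∃ m, acc = some m ∧ k1 e < k1 m) →
    (∀ y ∈ l, k1 e < k1 y) →
    (l.foldl (m2step k1 k2) acc = none ∨ ∃ m, l.foldl (m2step k1 k2) acc = some m ∧ k1 e < k1 m) := by
  intro l
  induction l with
  | nil => intro acc hacc _; exact hacc
  | cons x xs ih =>
    intro acc hacc h
    rw [List.foldl_cons]
    apply ih
    · rcases hacc with rfl | ⟨m, rfl, hm⟩
      · exact Or.inr ⟨x, rfl, h x (by simp)⟩
      · simp only [m2step]
        split
        · exact Or.inr ⟨x, rfl, h x (by simp)⟩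
        · exact Or.inr ⟨m, rfl, hm⟩
    · exact fun y hy => h y (by simp [hy])

lemma m2_first {α : Type} (k1 : α → Nat) (k2 : α → Int) (e : α) (pre suf : List α)
    (hpre : ∀ y ∈ pre, k1 e < k1 y)
    (hsuf : ∀ y ∈ suf, ¬ (k1 y < k1 e) ∧ (k1 y = k1 e → ¬ (k2 y < k2 e))) :
    (pre ++ e :: suf).foldl (m2step k1 k2) none = some e := by
  rw [List.foldl_append]
  have hacc := m2_pre k1 k2 e pre none (Or.inl rfl) hpre
  rw [List.foldl_cons]
  have hstep : m2step k1 k2 (pre.foldl (m2step k1 k2) none) e = some e := by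
    rcases hacc with hn | ⟨m, hm, hlt⟩
    · rw [hn]; rfl
    · rw [hm]; simp [m2step, hlt]
  rw [hstep]
  exact m2_keep k1 k2 e suf hsuf

-- fallback tier: when every element has rank 10, B's min-step is A's size-max-step
lemma fold_fb : ∀ (l : List (String × Int)) (acc : Option (String × Int)),
    (∀ e ∈ l, launch_rank e.1 = 10) →
    (∀ e, acc = some e → launch_rank e.1 = 10) →
    l.foldl (m2step K1 K2) acc = l.foldl maxstep acc := by
  intro l
  induction l with
  | nil => intro _ _ _; rfl
  | cons x xs ih =>
    intro acc hl hacc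
    have hx : launch_rank x.1 = 10 := hl x (by simp)
    rw [List.foldl_cons, List.foldl_cons]
    cases acc with
    | none =>
      have h1 : m2step K1 K2 none x = some x := rfl
      have h2 : maxstep none x = some x := rfl
      rw [h1, h2]
      exact ih (some x) (fun e he => hl e (List.mem_cons_of_mem _ he))
        (fun e he => by cases he; exact hx)
    | some m =>
      have hm : launch_rank m.1 = 10 := hacc m rfl
      have h1 : m2step K1 K2 (some m) x = if m.2 < x.2 then some x else some m := by
        simp only [m2step, K1, K2, hx, hm]
        rcases lt_or_ge m.2 x.2 with h2 | h2
        · simp [h2, show (-x.2 < -m.2) by omega]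
        · simp [show ¬ (m.2 < x.2) by omega, show ¬ (-x.2 < -m.2) by omega]
      have h2 : maxstep (some m) x = if m.2 < x.2 then some x else some m := rfl
      rw [h1, h2]
      by_cases hc : m.2 < x.2
      · rw [if_pos hc]
        exact ih (some x) (fun e he => hl e (List.mem_cons_of_mem _ he))
          (fun e he => by cases he; exact hx)
      · rw [if_neg hc]
        exact ih (some m) (fun e he => hl e (List.mem_cons_of_mem _ he))
          (fun e he => by cases he; exact hm)

lemma fb_eq (files : List (String × Int)) (h : ∀ e ∈ files, launch_rank e.1 = 10) :
    fbA files = (PySem.List.min2? files K1 K2).map (fun e => e.1) := by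
  have h1 : PySem.List.min2? files K1 K2 = PySem.List.max? files (fun t => t.2) := by
    rw [min2?_eq_fold, max?_eq_fold]
    exact fold_fb files none h (by intro e he; cases he)
  rw [fbA, h1]

-- main induction: the remaining cascade equals B's min, given that the remaining
-- checks determine the rank (counting from k) of every element
lemma main_lemma : ∀ (cs : List (String → Bool)) (files : List (String × Int)) (k : Nat),
    k + cs.length = 10 →
    (∀ e ∈ files, launch_rank e.1 = rankFrom e.1 cs k) →
    cascade cs (files.map (fun x => x.1)) (fbA files) =
      (PySem.List.min2? files K1 K2).map (fun e => e.1) := by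
  intro cs
  induction cs with
  | nil =>
    intro files k _ hr
    have h10 : ∀ e ∈ files, launch_rank e.1 = 10 := fun e he => by rw [hr e he]; rfl
    exact fb_eq files h10
  | cons c cs ih =>
    intro files k hk hr
    have hk' : (k + 1) + cs.length = 10 := by simp at hk; omega
    cases hh : ((files.map (fun x => x.1)).filter c).head? with
    | none =>
      have hnil := List.head?_eq_none_iff.1 hh
      have hnone : ∀ e ∈ files, c e.1 = false := by
        intro e he
        have := (List.filter_eq_nil_iff.1 hnil) e.1 (List.mem_map_of_mem he)
        simpa using this
      have hstep : cascade (c :: cs) (files.map fun x => x.1) (fbA files)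
          = cascade cs (files.map fun x => x.1) (fbA files) := by
        simp only [cascade]
        rw [hh]
        rfl
      rw [hstep]
      apply ih files (k + 1) hk'
      intro e he
      rw [hr e he]
      simp [rankFrom, hnone e he]
    | some p =>
      have hfind := hh
      rw [List.head?_filter, List.find?_map] at hfind
      obtain ⟨e, he, hep⟩ := Option.map_eq_some_iff.1 hfind
      rw [List.find?_eq_some_iff_append] at he
      obtain ⟨hce, pre, suf, hfeq, hpre⟩ := he
      have hce' : c e.1 = true := hce
      subst hfeq
      have hmem_e : e ∈ pre ++ e :: suf := by simp
      have rank_e : launch_rank e.1 = k := by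
        rw [hr e hmem_e]; simp [rankFrom, hce']
      have hk9 : k ≤ 9 := by simp at hk; omega
      -- elements before e strictly lose on the rank key
      have hpre' : ∀ y ∈ pre, K1 e < K1 y := by
        intro y hy
        have hcy : c y.1 = false := by simpa using hpre y hy
        have hry : launch_rank y.1 = rankFrom y.1 cs (k + 1) := by
          rw [hr y (List.mem_append_left _ hy)]; simp [rankFrom, hcy]
        have hge : k + 1 ≤ launch_rank y.1 := hry ▸ rankFrom_ge y.1 cs (k + 1) hk'
        simp only [K1, rank_e]; omega
      -- elements after e do not strictly beat e
      have hsuf' : ∀ y ∈ suf, ¬ (K1 y < K1 e) ∧ (K1 y = K1 e → ¬ (K2 y < K2 e)) := by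
        intro y hy
        have hgey : k ≤ launch_rank y.1 := by
          rw [hr y (List.mem_append_right _ (List.mem_cons_of_mem _ hy))]
          exact rankFrom_ge y.1 (c :: cs) k (by simpa using hk)
        constructor
        · simp only [K1, rank_e]; omega
        · intro heq
          have hy10 : launch_rank y.1 ≠ 10 := by
            simp only [K1, rank_e] at heq; omega
          have he10 : launch_rank e.1 ≠ 10 := by omega
          simp [K2, hy10, he10]
      have hmin : PySem.List.min2? (pre ++ e :: suf) K1 K2 = some e := by
        rw [min2?_eq_fold]
        exact m2_first K1 K2 e pre suf hpre' hsuf'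
      have hlhs : cascade (c :: cs) ((pre ++ e :: suf).map fun x => x.1) (fbA (pre ++ e :: suf)) = some p := by
        simp only [cascade]
        rw [hh]
        rfl
      rw [hlhs, hmin]
      simp [hep]

theorem detect_launch_file_spec_aux (files : List (String × Int)) :
    detect_launch_file files = detect_launch_file_alt files := by
  by_cases h : files = []
  · subst h; rfl
  · rw [A_eq_cascade files h]
    rw [main_lemma checksA files 0 (by rfl) (fun e _ => rank_eq e.1)]
    simp only [detect_launch_file_alt, if_neg h]
    rfl

-- ===== VERDICT (by name: the statement is the Claim_ definition above) =====
theorem detect_launch_file_spec : Claim_equal_detect_launch_file := by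
  intro files _
  exact detect_launch_file_spec_aux files
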